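-- pv_equiv track=rewrite | github.com/RAJUS248/Interview-Codes | 03_Strings/02_Anagram Check.py | Anagram_Check_v3
-- ===== SOURCE A (Python) =====
-- def Anagram_Check_v3(string1,string2):
--
--     freq = {}
--
--     for ch in string1:
--         if ch in freq:
--             freq[ch] += 1
--
--         else:
--             freq[ch] = 1
--
--     for ch in string2:
--         if ch not in freq:
--            return False
--         freq[ch] -= 1
--
--         if freq[ch] < 0:
--             return False
--
--
--     return True
-- ===== SOURCE B (Python) =====
-- def Anagram_Check_v3(string1, string2):
--     have = {}
--     for ch in string1:
--         have[ch] = have.get(ch, 0) + 1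
--     need = {}
--     for ch in string2:
--         need[ch] = need.get(ch, 0) + 1
--     for ch, cnt in need.items():
--         if have.get(ch, 0) < cnt:
--             return False
--     return True
-- ===== Notes on version B (the rewrite author's own statement) =====
-- stated objective: alternative
-- what changed: B builds complete frequency tables for both strings and then compares them per character of string2's table, instead of A's destructive decrement-with-early-exit over a single table.
import Mathlib
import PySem

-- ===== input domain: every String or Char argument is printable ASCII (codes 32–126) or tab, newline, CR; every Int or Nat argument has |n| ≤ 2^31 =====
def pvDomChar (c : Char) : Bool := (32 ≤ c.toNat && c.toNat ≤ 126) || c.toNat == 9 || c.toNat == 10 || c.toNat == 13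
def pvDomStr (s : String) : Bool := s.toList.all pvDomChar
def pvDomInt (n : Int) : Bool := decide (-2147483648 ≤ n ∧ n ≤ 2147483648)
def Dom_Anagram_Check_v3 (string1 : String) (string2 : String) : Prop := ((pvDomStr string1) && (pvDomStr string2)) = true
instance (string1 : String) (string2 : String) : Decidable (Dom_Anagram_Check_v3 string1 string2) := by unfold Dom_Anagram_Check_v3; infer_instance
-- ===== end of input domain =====

-- B builds complete frequency tables for both strings and compares them, instead of
-- A's destructive decrement-with-early-exit over a single table (objective: alternative).

-- ===== PORT A =====
-- first loop of A: build freq from string1 (with A's explicit membership branch)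
def buildA (cs : List Char) : PySem.Dict Char Int :=
  cs.foldl (fun d ch =>
    if d.contains ch then d.insert ch (d.getD ch 0 + 1) else d.insert ch 1)
    PySem.Dict.empty

-- second loop of A: early-exit scan over string2, decrementing freq
def loopA (freq : PySem.Dict Char Int) : List Char → Bool
  | [] => true
  | ch :: t =>
    if freq.contains ch then
      let freq' := freq.insert ch (freq.getD ch 0 - 1)
      if freq'.getD ch 0 < 0 then false else loopA freq' t
    else false

def Anagram_Check_v3 (string1 : String) (string2 : String) : Bool :=
  loopA (buildA string1.toList) string2.toList

-- ===== PORT B =====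
def countB (cs : List Char) : PySem.Dict Char Int :=
  cs.foldl (fun d ch => d.insert ch (d.getD ch 0 + 1)) PySem.Dict.empty

def Anagram_Check_v3_alt (string1 : String) (string2 : String) : Bool :=
  let haveD := countB string1.toList
  let needD := countB string2.toList
  needD.items.all (fun p => !(haveD.getD p.1 0 < p.2))

-- ===== PRECONDITION & SPEC =====
def Spec_Anagram_Check_v3 (string1 : String) (string2 : String) (out : Bool) : Prop := out = Anagram_Check_v3_alt string1 string2
instance (string1 : String) (string2 : String) (out : Bool) : Decidable (Spec_Anagram_Check_v3 string1 string2 out) := by unfold Spec_Anagram_Check_v3; infer_instance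

-- ===== CLAIM (what is proved, stated in full; the proofs are below) =====
def Claim_equal_Anagram_Check_v3 : Prop := ∀ (string1 : String) (string2 : String), Dom_Anagram_Check_v3 string1 string2 → Spec_Anagram_Check_v3 string1 string2 (Anagram_Check_v3 string1 string2)

-- ===== LEMMAS AND PROOFS =====

-- A's building branch collapses: when the key is absent, getD is 0, so both branches insert getD+1
lemma buildA_eq_countB (cs : List Char) : buildA cs = countB cs := by
  unfold buildA countB
  congr 1
  funext d ch
  by_cases h : d.contains ch
  · simp [h]
  · have h0 : d.getD ch 0 = 0 := PySem.Dict.getD_of_not_contains d 0 (by simpa using h)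
    simp [h, h0]

lemma countB_getD (cs : List Char) (c : Char) :
    (countB cs).getD c 0 = (cs.count c : Int) := by
  unfold countB
  rw [PySem.Dict.foldl_insert_getD_add_one_eq_counter, PySem.Dict.getD_counter]

-- characterisation of A's early-exit decrement loop
lemma loopA_iff (rest : List Char) (freq : PySem.Dict Char Int) :
    loopA freq rest = true ↔ ∀ c ∈ rest, (rest.count c : Int) ≤ freq.getD c 0 := by
  induction rest generalizing freq with
  | nil => simp [loopA]
  | cons ch t ih =>
    by_cases hc : freq.contains ch
    · by_cases hv : freq.getD ch 0 - 1 < 0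
      · have hl : loopA freq (ch :: t) = false := by
          simp [loopA, hc, PySem.Dict.getD_insert_self, hv]
        rw [hl]
        simp only [Bool.false_eq_true, false_iff]
        intro h
        have := h ch (by simp)
        have : ((ch :: t).count ch : Int) = (t.count ch : Int) + 1 := by
          simp
        omega
      · have hl : loopA freq (ch :: t) = loopA (freq.insert ch (freq.getD ch 0 - 1)) t := by
          simp [loopA, hc, PySem.Dict.getD_insert_self, hv]
        rw [hl, ih]
        constructor
        · intro h c hmem
          by_cases hcc : c = ch
          · subst hcc
            by_cases hct : c ∈ t
            · have := h c hct
              rw [PySem.Dict.getD_insert_self] at this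
              have : ((c :: t).count c : Int) = (t.count c : Int) + 1 := by
                simp
              omega
            · have hz : t.count c = 0 := List.count_eq_zero.mpr hct
              have : ((c :: t).count c : Int) = (t.count c : Int) + 1 := by
                simp
              omega
          · have hct : c ∈ t := by
              rcases List.mem_cons.mp hmem with h1 | h1
              · exact absurd h1 hcc
              · exact h1
            have := h c hct
            rw [PySem.Dict.getD_insert_of_ne _ _ _ hcc] at this
            have h2 : (List.count c (ch :: t) : Int) = (List.count c t : Int) := by
              rw [List.count_cons_of_ne (Ne.symm hcc)]
            omega
        · intro h c hct
          by_cases hcc : c = ch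
          · subst hcc
            have := h c (by simp)
            rw [PySem.Dict.getD_insert_self]
            have h2 : ((c :: t).count c : Int) = (t.count c : Int) + 1 := by
              simp
            omega
          · have := h c (List.mem_cons_of_mem _ hct)
            rw [PySem.Dict.getD_insert_of_ne _ _ _ hcc]
            have h2 : (List.count c (ch :: t) : Int) = (List.count c t : Int) := by
              rw [List.count_cons_of_ne (Ne.symm hcc)]
            omega
    · have hl : loopA freq (ch :: t) = false := by simp [loopA, hc]
      rw [hl]
      simp only [Bool.false_eq_true, false_iff]
      intro h
      have := h ch (by simp)
      have hz : freq.getD ch 0 = 0 :=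
        PySem.Dict.getD_of_not_contains _ 0 (by simpa using hc)
      have : ((ch :: t).count ch : Int) = (t.count ch : Int) + 1 := by
        simp
      omega

-- characterisation of B
lemma altB_iff (s1 s2 : List Char) :
    (((countB s2).items.all (fun p => !((countB s1).getD p.1 0 < p.2))) = true) ↔
    ∀ c ∈ s2, (s2.count c : Int) ≤ (s1.count c : Int) := by
  unfold countB
  rw [PySem.Dict.foldl_insert_getD_add_one_eq_counter,
      PySem.Dict.foldl_insert_getD_add_one_eq_counter,
      PySem.Dict.items_counter]
  simp only [List.all_map, List.all_eq_true, Function.comp]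
  constructor
  · intro h c hmem
    have := h c (by simpa [PySem.Set.mem_ofList] using hmem)
    simp only [PySem.Dict.getD_counter, Bool.not_eq_eq_eq_not, Bool.not_true,
      decide_eq_false_iff_not, not_lt] at this
    exact this
  · intro h c hmem
    have := h c (by simpa [PySem.Set.mem_ofList] using hmem)
    simp only [PySem.Dict.getD_counter, Bool.not_eq_eq_eq_not, Bool.not_true,
      decide_eq_false_iff_not, not_lt]
    exact this

-- ===== VERDICT (by name: the statement is the Claim_ definition above) =====
theorem Anagram_Check_v3_spec : Claim_equal_Anagram_Check_v3 := by
  intro s1 s2 _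
  unfold Spec_Anagram_Check_v3 Anagram_Check_v3 Anagram_Check_v3_alt
  rw [buildA_eq_countB]
  have hA := loopA_iff s2.toList (countB s1.toList)
  have hB := altB_iff s1.toList s2.toList
  have : loopA (countB s1.toList) s2.toList = true ↔
      (((countB s2.toList).items.all
        (fun p => !((countB s1.toList).getD p.1 0 < p.2))) = true) := by
    rw [hA, hB]
    constructor
    · intro h c hm; have := h c hm; rw [countB_getD] at this; exact this
    · intro h c hm; have := h c hm; rw [countB_getD]; exact this
  simp only []
  cases hL : loopA (countB s1.toList) s2.toList <;>
  cases hR : ((countB s2.toList).items.all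
        (fun p => !((countB s1.toList).getD p.1 0 < p.2))) <;>
  simp_all
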